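-- pv_equiv track=rewrite | github.com/Arsen1302/Code-copy-detector | TestData/solutions/problem_1578_2.py | solution_1578_2
-- ===== SOURCE A (Python) =====
-- from typing import List
--
-- def solution_1578_2(n: int, roads: List[List[int]]) -> int:
--
--     '''The main idea is to count the frequency of the cities connected to roads and then
--        keep on assigning the integer value from one to n to each cities after sorting it. '''
--
--     f = [0 for _ in range(n)]   # for storing the frequency of each city connected to pathways
--
--     for x, y in roads:
--         f[x] += 1
--         f[y] += 1
--
--     f.sort()
--     s = 0
--     for i in range(len(f)):
--         s += f[i] * (i+1)  # assigning and storing the integer value to each cities frequency in ascending order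
--     return s
-- ===== SOURCE B (Python) =====
-- from typing import List
--
-- def solution_1578_2(n: int, roads: List[List[int]]) -> int:
--     # counting sort over degrees instead of comparison sort
--     f = [0] * n
--     for x, y in roads:
--         f[x] += 1
--         f[y] += 1
--     m = max(f, default=0)
--     counts = [0] * (m + 1)
--     for d in f:
--         counts[d] += 1
--     s = 0
--     rank = 1
--     for d in range(m + 1):
--         for _ in range(counts[d]):
--             s += d * rank
--             rank += 1
--     return s
-- ===== Notes on version B (the rewrite author's own statement) =====
-- stated objective: faster
-- what changed: Replaces A's comparison sort (f.sort()) plus index loop by a counting-sort pass: bucket the degree values into a counts array of size max+1 and walk the buckets in increasing value with a running rank, so no comparison sort happens.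
import Mathlib
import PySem

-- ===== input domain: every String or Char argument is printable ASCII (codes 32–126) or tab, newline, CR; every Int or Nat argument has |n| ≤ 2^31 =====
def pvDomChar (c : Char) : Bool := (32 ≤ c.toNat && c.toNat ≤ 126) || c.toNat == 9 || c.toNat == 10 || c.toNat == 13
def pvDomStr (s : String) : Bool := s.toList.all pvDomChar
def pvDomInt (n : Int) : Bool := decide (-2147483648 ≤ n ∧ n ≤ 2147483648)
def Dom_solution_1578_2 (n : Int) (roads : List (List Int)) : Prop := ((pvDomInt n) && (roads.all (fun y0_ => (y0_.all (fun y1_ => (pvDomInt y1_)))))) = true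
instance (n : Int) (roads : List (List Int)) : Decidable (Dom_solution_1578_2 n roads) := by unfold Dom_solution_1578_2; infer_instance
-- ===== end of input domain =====

-- B replaces A's comparison sort + index loop by a counting-sort pass: bucket the degree
-- frequencies by value and walk the buckets in increasing order with a running rank (alternative decomposition).

-- ===== PORT A =====
-- 'f[i] += 1' with Python's index semantics (negative indices wrap; Pre_ keeps i in range)
def pvBump (f : List Int) (i : Int) : List Int :=
  PySem.List.pySetD f i (PySem.List.pyGetD f i 0 + 1)

-- 'for x, y in roads: f[x] += 1; f[y] += 1' — the degree-building loop both Pythons share verbatim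
def pvAddRoads (roads : List (List Int)) (f0 : List Int) : List Int :=
  roads.foldl (fun f r =>
    match r with
    | [x, y] => pvBump (pvBump f x) y
    | _ => f) f0

def solution_1578_2 (n : Int) (roads : List (List Int)) : Int :=
  -- f = [0 for _ in range(n)]
  let f := pvAddRoads roads ((PySem.List.pyRange 0 n 1).map (fun _ => (0 : Int)))
  -- f.sort()
  let fs := PySem.List.sorted f (fun v => v) false
  -- s = 0; for i in range(len(f)): s += f[i] * (i+1)
  (PySem.List.pyRange 0 (fs.length : Int) 1).foldl
    (fun s i => s + PySem.List.pyGetD fs i 0 * (i + 1)) 0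

-- ===== PORT B =====
def solution_1578_2_alt (n : Int) (roads : List (List Int)) : Int :=
  -- f = [0] * n ; then the same road loop as A's Python (the two Pythons share those lines verbatim)
  let f := pvAddRoads roads (List.replicate n.toNat (0 : Int))
  -- m = max(f, default=0)
  let m := PySem.List.maxD f (fun v => v) 0
  -- counts = [0] * (m+1); for d in f: counts[d] += 1
  let counts := f.foldl (fun c d => pvBump c d) (List.replicate (m + 1).toNat (0 : Int))
  -- s = 0; rank = 1; for d in range(m+1): for _ in range(counts[d]): s += d*rank; rank += 1
  let res := (PySem.List.pyRange 0 (m + 1) 1).foldl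
    (fun (sr : Int × Int) d =>
      (PySem.List.pyRange 0 (PySem.List.pyGetD counts d 0) 1).foldl
        (fun (sr : Int × Int) _ => (sr.1 + d * sr.2, sr.2 + 1)) sr)
    ((0 : Int), (1 : Int))
  res.1

-- ===== PRECONDITION & SPEC =====
-- Pre_ excludes exactly the inputs where A raises: a road that is not a pair (ValueError on
-- unpacking) or a road endpoint outside Python's index range [-n, n) for the list f (IndexError).
def Pre_solution_1578_2 (n : Int) (roads : List (List Int)) : Prop :=
  ∀ r ∈ roads, r.length = 2 ∧ ∀ v ∈ r, PySem.Raise.InRange n.toNat v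
instance (n : Int) (roads : List (List Int)) : Decidable (Pre_solution_1578_2 n roads) := by
  unfold Pre_solution_1578_2; infer_instance

def pvWitness_solution_1578_2 : Int × List (List Int) := (3, [[0, 1], [1, 2], [0, 1]])

def Spec_solution_1578_2 (n : Int) (roads : List (List Int)) (out : Int) : Prop := out = solution_1578_2_alt n roads
instance (n : Int) (roads : List (List Int)) (out : Int) : Decidable (Spec_solution_1578_2 n roads out) := by unfold Spec_solution_1578_2; infer_instance

-- ===== CLAIM (what is proved, stated in full; the proofs are below) =====
def Claim_equal_solution_1578_2 : Prop := ∀ (n : Int) (roads : List (List Int)), Dom_solution_1578_2 n roads → Pre_solution_1578_2 n roads → Spec_solution_1578_2 n roads (solution_1578_2 n roads)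

-- ===== LEMMAS AND PROOFS =====

-- [0 for _ in range(n)] and [0] * n build the same list
lemma pvInit_eq (n : Int) :
    (PySem.List.pyRange 0 n 1).map (fun _ => (0 : Int)) = List.replicate n.toNat 0 := by
  rw [List.eq_replicate_iff]
  refine ⟨by simp [PySem.List.pyRange_one], by intro b hb; rcases List.mem_map.mp hb with ⟨_, _, h⟩; omega⟩

-- pyGet? returns an element of the list
lemma pvGet?_mem {xs : List Int} {i : Int} {a : Int}
    (h : PySem.List.pyGet? xs i = some a) : a ∈ xs := by
  unfold PySem.List.pyGet? at h
  cases hk : PySem.List.pyIdx? xs.length i with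
  | none => rw [hk] at h; simp at h
  | some k =>
    rw [hk] at h
    exact List.mem_of_getElem? (by simpa using h)

-- pyGetD into a list of nonnegatives is nonnegative
lemma pvGetD_nonneg {f : List Int} (h : ∀ v ∈ f, 0 ≤ v) (i : Int) :
    0 ≤ PySem.List.pyGetD f i 0 := by
  cases hg : PySem.List.pyGet? f i with
  | none => simp [PySem.List.pyGetD, hg]
  | some a =>
    simpa [PySem.List.pyGetD, hg] using h a (pvGet?_mem hg)

lemma pvBump_nonneg {f : List Int} (h : ∀ v ∈ f, 0 ≤ v) (i : Int) :
    ∀ v ∈ pvBump f i, 0 ≤ v := by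
  intro v hv
  unfold pvBump PySem.List.pySetD PySem.List.pySet? at hv
  cases hk : PySem.List.pyIdx? f.length i with
  | none => exact h v (by simpa [hk] using hv)
  | some k =>
    rcases List.mem_or_eq_of_mem_set (by simpa [hk] using hv) with hm | he
    · exact h v hm
    · have := pvGetD_nonneg h i
      omega

lemma pvBump_length (f : List Int) (i : Int) : (pvBump f i).length = f.length := by
  unfold pvBump; exact PySem.List.length_pySetD f i _

lemma pvAddRoads_nonneg (roads : List (List Int)) :
    ∀ f0 : List Int, (∀ v ∈ f0, 0 ≤ v) → ∀ v ∈ pvAddRoads roads f0, 0 ≤ v := by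
  induction roads with
  | nil => intro f0 h; simpa [pvAddRoads] using h
  | cons r t ih =>
    intro f0 h
    simp only [pvAddRoads, List.foldl_cons]
    match r with
    | [] => exact ih f0 h
    | [x] => exact ih f0 h
    | [x, y] => exact ih _ (pvBump_nonneg (pvBump_nonneg h x) y)
    | x :: y :: z :: t' => exact ih f0 h

-- effect of one 'counts[d] += 1' on a pyGetD lookup (nonnegative indices)
lemma pvBump_getD (c : List Int) {x : Int} (hx : 0 ≤ x) (hlt : x < (c.length : Int))
    {d : Int} (hd : 0 ≤ d) :
    PySem.List.pyGetD (pvBump c x) d 0 =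
      PySem.List.pyGetD c d 0 + (if d = x then 1 else 0) := by
  have hset : pvBump c x = c.set x.toNat (PySem.List.pyGetD c x 0 + 1) := by
    unfold pvBump; exact PySem.List.pySetD_of_nonneg c _ hx
  by_cases hdl : d < (c.length : Int)
  · have hdn : d.toNat < c.length := by omega
    rw [hset, PySem.List.pyGetD_eq_getElem _ 0 hd (by simpa using hdl),
        PySem.List.pyGetD_eq_getElem _ 0 hd hdl, List.getElem_set]
    by_cases he : d = x
    · have hxd : x.toNat = d.toNat := by omega
      rw [PySem.List.pyGetD_eq_getElem _ 0 hx hlt]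
      simp [he, hxd]
    · have hxd : ¬ (x.toNat = d.toNat) := by omega
      simp [hxd, he]
  · have h1 : PySem.List.pyGet? (pvBump c x) d = none := by
      rw [PySem.List.pyGet?_eq_none_iff, pvBump_length]
      simp only [PySem.Raise.InRange]
      omega
    have h2 : PySem.List.pyGet? c d = none := by
      rw [PySem.List.pyGet?_eq_none_iff]
      simp only [PySem.Raise.InRange]
      omega
    have hne : d ≠ x := by omega
    rw [PySem.List.pyGetD_of_none _ _ _ h1, PySem.List.pyGetD_of_none _ _ _ h2]
    simp [hne]

-- the counting loop computes occurrence counts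
lemma pvCounts_getD (l : List Int) : ∀ c : List Int,
    (∀ x ∈ l, 0 ≤ x ∧ x < (c.length : Int)) → ∀ d : Int, 0 ≤ d →
    PySem.List.pyGetD (l.foldl (fun c d => pvBump c d) c) d 0 =
      PySem.List.pyGetD c d 0 + (l.count d : Int) := by
  induction l with
  | nil => intro c _ d _; simp
  | cons x t ih =>
    intro c h d hd
    rcases h x (by simp) with ⟨hx0, hx1⟩
    rw [List.foldl_cons,
        ih (pvBump c x) (by
          intro z hz
          rw [pvBump_length]
          exact h z (by simp [hz])) d hd,
        pvBump_getD c hx0 hx1 hd, List.count_cons]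
    rcases eq_or_ne d x with he | he
    · subst he
      simp
      ring
    · simp [he, Ne.symm he]

-- pyGetD of the all-zero initial counts list
lemma pvGetD_replicate_zero (k : Nat) (d : Int) :
    PySem.List.pyGetD (List.replicate k (0 : Int)) d 0 = 0 := by
  cases hg : PySem.List.pyGet? (List.replicate k (0 : Int)) d with
  | none => simp [PySem.List.pyGetD, hg]
  | some a =>
    have ha : a = 0 := List.eq_of_mem_replicate (pvGet?_mem hg)
    simp [PySem.List.pyGetD, hg, ha]

-- A's index loop is the rank-accumulating fold over the list itself
lemma pvALoop (xs : List Int) : ∀ (a r : Int),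
    (PySem.List.pyRange 0 (xs.length : Int) 1).foldl
      (fun s i => s + PySem.List.pyGetD xs i 0 * (i + r)) a
    = (xs.foldl (fun (sr : Int × Int) d => (sr.1 + d * sr.2, sr.2 + 1)) (a, r)).1 := by
  induction xs with
  | nil => intro a r; simp
  | cons x t ih =>
    intro a r
    have hcons : PySem.List.pyRange 0 (((x :: t).length : Int)) 1 =
        0 :: PySem.List.pyRange 1 (((x :: t).length : Int)) 1 :=
      PySem.List.pyRange_one_cons (by simp)
    rw [hcons, List.foldl_cons]
    have hshift : PySem.List.pyRange 1 (((x :: t).length : Int)) 1 =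
        (PySem.List.pyRange 0 ((t.length : Int)) 1).map (· + 1) := by
      rw [PySem.List.pyRange_one, PySem.List.pyRange_one, List.map_map]
      simp only [List.length_cons]
      have : ((t.length : Int) + 1 - 1).toNat = ((t.length : Int) - 0).toNat := by omega
      push_cast
      rw [this]
      apply List.map_congr_left
      intro k _
      simp; ring
    rw [hshift, List.foldl_map]
    have hbody : ∀ (s i : Int), i ∈ PySem.List.pyRange 0 ((t.length : Int)) 1 →
        s + PySem.List.pyGetD (x :: t) (i + 1) 0 * ((i + 1) + r)
        = s + PySem.List.pyGetD t i 0 * (i + (r + 1)) := by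
      intro s i hi
      rcases PySem.List.mem_pyRange_one.mp hi with ⟨h0, _⟩
      have h1 : (i + 1) = ((i.toNat + 1 : Nat) : Int) := by omega
      have h2 : i = ((i.toNat : Nat) : Int) := by omega
      have e1 : PySem.List.pyGetD (x :: t) (i + 1) 0 = t.getD i.toNat 0 := by
        conv_lhs => rw [h1, PySem.List.pyGetD_natCast, List.getD_cons_succ]
      have e2 : PySem.List.pyGetD t i 0 = t.getD i.toNat 0 := by
        conv_lhs => rw [h2, PySem.List.pyGetD_natCast]
      rw [e1, e2]
      ring
    rw [PySem.List.foldl_congr_mem _ _ _ _ hbody]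
    have h0 : PySem.List.pyGetD (x :: t) 0 0 = x := PySem.List.pyGetD_zero_cons x t 0
    have harith : a + PySem.List.pyGetD (x :: t) 0 0 * (0 + r) = a + x * r := by rw [h0]; ring
    rw [harith, ih (a + x * r) (r + 1)]
    simp [List.foldl_cons]

-- a fold whose body ignores the element only depends on the length
lemma pvFoldIgnore {α β σ : Type} (g : σ → σ) :
    ∀ (l1 : List α) (l2 : List β), l1.length = l2.length → ∀ init : σ,
    l1.foldl (fun a _ => g a) init = l2.foldl (fun a _ => g a) init := by
  intro l1
  induction l1 with
  | nil => intro l2 h init; cases l2 with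
    | nil => rfl
    | cons y t => simp at h
  | cons x t ih =>
    intro l2 h init
    cases l2 with
    | nil => simp at h
    | cons y t2 =>
      simp only [List.foldl_cons]
      exact ih t2 (by simpa using h) (g init)

-- count of a value in the bucket expansion
lemma pvFlatCountAux (cnt : Int → Nat) (v : Int) (b : Int) : ∀ (k : Nat) (a : Int),
    (b - a).toNat = k →
    ((PySem.List.pyRange a b 1).flatMap (fun d => List.replicate (cnt d) d)).count v
    = if a ≤ v ∧ v < b then cnt v else 0 := by
  intro k
  induction k with
  | zero =>
    intro a hk
    rw [PySem.List.pyRange_one_eq_nil (by omega)]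
    have : ¬ (a ≤ v ∧ v < b) := by omega
    simp [this]
  | succ k ih =>
    intro a hk
    rw [PySem.List.pyRange_one_cons (by omega), List.flatMap_cons, List.count_append,
        List.count_replicate, ih (a + 1) (by omega)]
    simp only [beq_iff_eq]
    by_cases he : a = v
    · have h2 : ¬ (a + 1 ≤ v ∧ v < b) := by omega
      have h3 : a ≤ v ∧ v < b := by omega
      simp [he, h3]
    · have : (if a ≤ v ∧ v < b then cnt v else 0) = (if a + 1 ≤ v ∧ v < b then cnt v else 0) := by
        by_cases hv : a + 1 ≤ v ∧ v < b
        · rw [if_pos hv, if_pos (by omega)]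
        · rw [if_neg hv, if_neg (by omega)]
      simp [he, this]

lemma pvFlatCount (cnt : Int → Nat) (v : Int) (a b : Int) :
    ((PySem.List.pyRange a b 1).flatMap (fun d => List.replicate (cnt d) d)).count v
    = if a ≤ v ∧ v < b then cnt v else 0 :=
  pvFlatCountAux cnt v b (b - a).toNat a rfl

-- the bucket expansion is sorted
lemma pvFlatPairwiseAux (cnt : Int → Nat) (b : Int) : ∀ (k : Nat) (a : Int),
    (b - a).toNat = k →
    List.Pairwise (fun x y => x ≤ y)
      ((PySem.List.pyRange a b 1).flatMap (fun d => List.replicate (cnt d) d)) := by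
  intro k
  induction k with
  | zero =>
    intro a hk
    rw [PySem.List.pyRange_one_eq_nil (by omega)]
    simp
  | succ k ih =>
    intro a hk
    rw [PySem.List.pyRange_one_cons (by omega), List.flatMap_cons, List.pairwise_append]
    refine ⟨List.pairwise_replicate.mpr (Or.inr le_rfl), ih (a + 1) (by omega), ?_⟩
    intro x hx y hy
    have hxa : x = a := List.eq_of_mem_replicate hx
    rcases List.mem_flatMap.mp hy with ⟨d, hd, hyd⟩
    have hyd' : y = d := List.eq_of_mem_replicate hyd
    rcases PySem.List.mem_pyRange_one.mp hd with ⟨h1, _⟩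
    omega

lemma pvFlatPairwise (cnt : Int → Nat) (a b : Int) :
    List.Pairwise (fun x y => x ≤ y)
      ((PySem.List.pyRange a b 1).flatMap (fun d => List.replicate (cnt d) d)) :=
  pvFlatPairwiseAux cnt b (b - a).toNat a rfl

-- ===== VERDICT helper: the main equivalence =====
theorem pvMain (n : Int) (roads : List (List Int)) :
    solution_1578_2 n roads = solution_1578_2_alt n roads := by
  unfold solution_1578_2 solution_1578_2_alt
  simp only [pvInit_eq]
  set f := pvAddRoads roads (List.replicate n.toNat (0 : Int)) with hf
  set m := PySem.List.maxD f (fun v => v) 0 with hm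
  -- nonnegativity of degrees
  have hnonneg : ∀ v ∈ f, 0 ≤ v := by
    apply pvAddRoads_nonneg
    intro v hv
    rw [List.eq_of_mem_replicate hv]
  -- max bound
  have hmax : (∀ v ∈ f, v ≤ m) ∧ 0 ≤ m := by
    cases hq : PySem.List.max? f (fun v => v) with
    | none =>
      have : f = [] := (PySem.List.max?_eq_none_iff f _).mp hq
      constructor
      · intro v hv; rw [this] at hv; simp at hv
      · simp [hm, PySem.List.maxD, hq]
    | some w =>
      have hw : ∀ y ∈ f, y ≤ w := PySem.List.max?_isMax hq
      have hwm : m = w := by simp [hm, PySem.List.maxD, hq]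
      exact ⟨by rw [hwm]; exact hw, by rw [hwm]; exact hnonneg w (PySem.List.max?_mem hq)⟩
  -- counts characterization
  set counts := f.foldl (fun c d => pvBump c d) (List.replicate (m + 1).toNat (0 : Int)) with hc
  have hclen : ((List.replicate (m + 1).toNat (0 : Int)).length : Int) = m + 1 := by
    simp; omega
  have hcounts : ∀ d : Int, 0 ≤ d →
      PySem.List.pyGetD counts d 0 = (f.count d : Int) := by
    intro d hd
    rw [hc, pvCounts_getD f _ (by
      intro x hx
      refine ⟨hnonneg x hx, ?_⟩
      rw [hclen]
      have := hmax.1 x hx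
      omega) d hd, pvGetD_replicate_zero]
    ring
  -- the sorted list equals the bucket expansion
  set L := (PySem.List.pyRange 0 (m + 1) 1).flatMap
      (fun d => List.replicate (f.count d) d) with hL
  have hLf : PySem.List.sorted f (fun v => v) false = L := by
    apply PySem.List.sorted_id_eq_of_perm_of_pairwise
    · rw [List.perm_iff_count]
      intro v
      rw [hL, pvFlatCount]
      by_cases hv : 0 ≤ v ∧ v < m + 1
      · simp [hv]
      · rw [if_neg hv]
        symm
        rw [List.count_eq_zero]
        intro hmem
        exact hv ⟨hnonneg v hmem, by have := hmax.1 v hmem; omega⟩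
    · exact pvFlatPairwise _ 0 (m + 1)
  -- A's side: index loop = rank fold over sorted list
  rw [hLf]
  rw [pvALoop L 0 1]
  -- B's side: nested loop = rank fold over L
  rw [hL, List.foldl_flatMap]
  congr 1
  apply PySem.List.foldl_congr_mem
  intro sr d hd
  rcases PySem.List.mem_pyRange_one.mp hd with ⟨hd0, _⟩
  rw [hcounts d hd0]
  have hlen : (PySem.List.pyRange 0 ((f.count d : Nat) : Int) 1).length
      = (List.replicate (f.count d) d).length := by
    rw [PySem.List.length_pyRange_one]
    simp
  rw [pvFoldIgnore (fun sr : Int × Int => (sr.1 + d * sr.2, sr.2 + 1)) _ _ hlen sr]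
  apply PySem.List.foldl_congr_mem
  intro acc x hx
  rw [List.eq_of_mem_replicate hx]

-- ===== VERDICT (by name: the statement is the Claim_ definition above) =====
theorem solution_1578_2_spec : Claim_equal_solution_1578_2 := by
  intro n roads _ _
  unfold Spec_solution_1578_2
  exact pvMain n roads
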